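-- pv_equiv track=rewrite | github.com/tinchopmanya/collatz | scripts/m22_freeze_s2_k16.py | trie_node_count
-- ===== SOURCE A (Python) =====
-- def trie_node_count(words: list[str]) -> int:
--     trie: dict[str, object] = {}
--     count = 1
--     for word in words:
--         node = trie
--         for char in word:
--             if char not in node:
--                 node[char] = {}
--                 count += 1
--             node = node[char]  # type: ignore[assignment]
--     return count
-- ===== SOURCE B (Python) =====
-- def trie_node_count(words: list[str]) -> int:
--     prefixes: set[str] = set()
--     for word in words:
--         for i in range(len(word)):
--             prefixes.add(word[:i + 1])
--     return 1 + len(prefixes)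
-- ===== Notes on version B (the rewrite author's own statement) =====
-- stated objective: simpler
-- what changed: B replaces the nested-dict trie walk (pointer chasing with conditional node creation and an interleaved counter) by collecting every non-empty prefix of every word into a set and returning 1 + its cardinality.
import Mathlib
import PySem

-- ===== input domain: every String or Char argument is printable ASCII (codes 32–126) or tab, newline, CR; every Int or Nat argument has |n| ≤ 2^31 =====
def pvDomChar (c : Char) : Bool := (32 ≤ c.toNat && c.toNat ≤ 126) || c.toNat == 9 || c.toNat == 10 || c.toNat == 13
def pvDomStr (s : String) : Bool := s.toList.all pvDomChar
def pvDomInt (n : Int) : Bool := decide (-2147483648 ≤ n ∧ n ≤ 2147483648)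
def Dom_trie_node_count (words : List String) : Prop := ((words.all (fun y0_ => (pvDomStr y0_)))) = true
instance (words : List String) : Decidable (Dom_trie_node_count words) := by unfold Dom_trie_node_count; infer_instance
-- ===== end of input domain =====

-- B counts 1 + |{non-empty prefixes}| collected in a set instead of walking/growing A's nested-dict trie; return value equivalence, same objective 'simpler'.

-- ===== PORT A =====
-- A's nested dict trie, as a mutual pair (children = explicit association list of Char → subtrie)
mutual
inductive PvTrie : Type where
  | mk : PvKids → PvTrie
inductive PvKids : Type where
  | nil : PvKids
  | cons : Char → PvTrie → PvKids → PvKids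
end

-- 'char in node' / 'node[char]' on the children list
def kidsFind? : PvKids → Char → Option PvTrie
  | PvKids.nil, _ => none
  | PvKids.cons d t rest, c => if d = c then some t else kidsFind? rest c

-- in-place update of an existing key (dict mutation of a present key keeps its slot)
def kidsReplace : PvKids → Char → PvTrie → PvKids
  | PvKids.nil, _, _ => PvKids.nil
  | PvKids.cons d t rest, c, t' =>
      if d = c then PvKids.cons d t' rest else PvKids.cons d t (kidsReplace rest c t')

-- 'node[char] = {}' for a fresh key appends (dict insertion order)
def kidsSnoc : PvKids → Char → PvTrie → PvKids
  | PvKids.nil, c, t' => PvKids.cons c t' PvKids.nil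
  | PvKids.cons d t rest, c, t' => PvKids.cons d t (kidsSnoc rest c t')

-- the inner 'for char in word' walk: returns the updated trie and the number of nodes created
def pvInsert : PvTrie → List Char → PvTrie × Int
  | t, [] => (t, 0)
  | PvTrie.mk ch, c :: rest =>
    match kidsFind? ch c with
    | some child =>
        let r := pvInsert child rest
        (PvTrie.mk (kidsReplace ch c r.1), r.2)
    | none =>
        let r := pvInsert (PvTrie.mk PvKids.nil) rest
        (PvTrie.mk (kidsSnoc ch c r.1), r.2 + 1)

def trie_node_count (words : List String) : Int :=
  (words.foldl (fun st w =>
      let r := pvInsert st.1 w.toList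
      (r.1, st.2 + r.2)) (PvTrie.mk PvKids.nil, (1 : Int))).2

-- ===== PORT B =====
def trie_node_count_alt (words : List String) : Int :=
  let prefixes : PySem.Set String := words.foldl (fun s w =>
      (PySem.List.pyRange 0 (PySem.Str.len w) 1).foldl
        (fun s i => PySem.Set.add s (PySem.Str.slice w none (some (i + 1)))) s)
    PySem.Set.empty
  1 + PySem.Set.len prefixes

-- ===== PRECONDITION & SPEC =====
def Spec_trie_node_count (words : List String) (out : Int) : Prop := out = trie_node_count_alt words
instance (words : List String) (out : Int) : Decidable (Spec_trie_node_count words out) := by unfold Spec_trie_node_count; infer_instance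

-- ===== CLAIM (what is proved, stated in full; the proofs are below) =====
def Claim_equal_trie_node_count : Prop := ∀ (words : List String), Dom_trie_node_count words → Spec_trie_node_count words (trie_node_count words)

-- ===== LEMMAS AND PROOFS =====

-- membership of a (non-empty) path in the trie
def memT : PvTrie → List Char → Bool
  | _, [] => true
  | PvTrie.mk ch, c :: r =>
    match kidsFind? ch c with
    | some t => memT t r
    | none => false

-- the non-empty prefixes of a word, shortest first
def pfx : List Char → List (List Char)
  | [] => []
  | c :: r => [c] :: (pfx r).map (c :: ·)

-- add all prefixes (each under a fixed path prefix 'pre') to the set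
def addAll (s : PySem.Set String) (l : List (List Char)) (pre : List Char) : PySem.Set String :=
  l.foldl (fun s p => PySem.Set.add s (String.ofList (pre ++ p))) s

theorem kidsFind?_replace_self : ∀ (ch : PvKids) (c : Char) (t : PvTrie) (t' : PvTrie),
    kidsFind? ch c = some t → kidsFind? (kidsReplace ch c t') c = some t'
  | PvKids.nil, c, t, t', h => by simp [kidsFind?] at h
  | PvKids.cons d u rest, c, t, t', h => by
      by_cases hdc : d = c
      · simp [kidsReplace, kidsFind?, hdc]
      · simp only [kidsFind?, if_neg hdc] at h
        simp only [kidsReplace, if_neg hdc, kidsFind?, if_neg hdc]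
        exact kidsFind?_replace_self rest c t t' h

theorem kidsFind?_replace_ne : ∀ (ch : PvKids) (c d : Char) (t' : PvTrie), d ≠ c →
    kidsFind? (kidsReplace ch c t') d = kidsFind? ch d
  | PvKids.nil, c, d, t', _ => by simp [kidsReplace]
  | PvKids.cons e u rest, c, d, t', hdc => by
      by_cases hec : e = c
      · subst hec
        simp [kidsReplace, kidsFind?, show ¬ e = d from fun h => hdc h.symm]
      · simp only [kidsReplace, if_neg hec, kidsFind?]
        by_cases hed : e = d
        · simp [hed]
        · simp only [if_neg hed]
          exact kidsFind?_replace_ne rest c d t' hdc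

theorem kidsFind?_snoc_self : ∀ (ch : PvKids) (c : Char) (t' : PvTrie),
    kidsFind? ch c = none → kidsFind? (kidsSnoc ch c t') c = some t'
  | PvKids.nil, c, t', _ => by simp [kidsSnoc, kidsFind?]
  | PvKids.cons d u rest, c, t', h => by
      by_cases hdc : d = c
      · simp [kidsFind?, hdc] at h
      · simp only [kidsFind?, if_neg hdc] at h
        simp only [kidsSnoc, kidsFind?, if_neg hdc]
        exact kidsFind?_snoc_self rest c t' h

theorem kidsFind?_snoc_ne : ∀ (ch : PvKids) (c d : Char) (t' : PvTrie), d ≠ c →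
    kidsFind? (kidsSnoc ch c t') d = kidsFind? ch d
  | PvKids.nil, c, d, t', hdc => by
      simp [kidsSnoc, kidsFind?, show ¬ c = d from fun h => hdc h.symm]
  | PvKids.cons e u rest, c, d, t', hdc => by
      simp only [kidsSnoc, kidsFind?]
      by_cases hed : e = d
      · simp [hed]
      · simp only [if_neg hed]
        exact kidsFind?_snoc_ne rest c d t' hdc

theorem mem_addAll (l : List (List Char)) : ∀ (s : PySem.Set String) (pre : List Char) (y : String),
    y ∈ addAll s l pre ↔ y ∈ s ∨ ∃ p ∈ l, y = String.ofList (pre ++ p) := by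
  induction l with
  | nil => intro s pre y; simp [addAll]
  | cons p l ih =>
      intro s pre y
      simp only [addAll, List.foldl_cons]
      rw [show (List.foldl (fun s p => PySem.Set.add s (String.ofList (pre ++ p)))
            (PySem.Set.add s (String.ofList (pre ++ p))) l)
          = addAll (PySem.Set.add s (String.ofList (pre ++ p))) l pre from rfl, ih]
      simp only [PySem.Set.mem_add, List.mem_cons]
      constructor
      · rintro ((h | h) | ⟨q, hq, rfl⟩)
        · exact Or.inl h
        · exact Or.inr ⟨p, Or.inl rfl, h⟩
        · exact Or.inr ⟨q, Or.inr hq, rfl⟩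
      · rintro (h | ⟨q, (rfl | hq), rfl⟩)
        · exact Or.inl (Or.inl h)
        · exact Or.inl (Or.inr rfl)
        · exact Or.inr ⟨q, hq, rfl⟩

theorem addAll_map_cons (s : PySem.Set String) (L : List (List Char)) (pre : List Char) (c : Char) :
    addAll s (L.map (c :: ·)) pre = addAll s L (pre ++ [c]) := by
  simp only [addAll, List.foldl_map]
  congr 1
  funext s' p
  rw [List.append_cons]

theorem ofList_inj {l m : List Char} (h : String.ofList l = String.ofList m) : l = m := by
  have := congrArg String.toList h; simpa using this

theorem core : ∀ (cs pre : List Char) (t : PvTrie) (s : PySem.Set String),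
    (∀ q, q ≠ ([] : List Char) → (memT t q = true ↔ String.ofList (pre ++ q) ∈ s)) →
    (∀ q, q ≠ ([] : List Char) →
        (memT (pvInsert t cs).1 q = true ↔ String.ofList (pre ++ q) ∈ addAll s (pfx cs) pre))
    ∧ ((addAll s (pfx cs) pre).length : Int) = (s.length : Int) + (pvInsert t cs).2 := by
  intro cs
  induction cs with
  | nil =>
      intro pre t s H
      refine ⟨fun q hq => ?_, ?_⟩
      · simpa [pvInsert, pfx, addAll] using H q hq
      · simp [pvInsert, pfx, addAll]
  | cons c rest ih =>
      intro pre t s H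
      obtain ⟨ch⟩ := t
      have hpfx : addAll s (pfx (c :: rest)) pre
          = addAll (PySem.Set.add s (String.ofList (pre ++ [c]))) (pfx rest) (pre ++ [c]) := by
        show addAll s ([c] :: (pfx rest).map (c :: ·)) pre = _
        simp only [addAll, List.foldl_cons]
        exact addAll_map_cons _ _ _ _
      cases h : kidsFind? ch c with
      | some child =>
          have hins : pvInsert (PvTrie.mk ch) (c :: rest)
              = (PvTrie.mk (kidsReplace ch c (pvInsert child rest).1), (pvInsert child rest).2) := by
            simp [pvInsert, h]
          have hc1 : memT (PvTrie.mk ch) [c] = true := by simp [memT, h]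
          have hmem : String.ofList (pre ++ [c]) ∈ s := (H [c] (by simp)).1 hc1
          have hadd : PySem.Set.add s (String.ofList (pre ++ [c])) = s := PySem.Set.add_of_mem hmem
          have H' : ∀ q, q ≠ ([] : List Char) →
              (memT child q = true ↔ String.ofList ((pre ++ [c]) ++ q) ∈ s) := by
            intro q hq
            have := H (c :: q) (by simp)
            simp only [memT, h] at this
            rw [List.append_cons] at this
            exact this
          obtain ⟨ih1, ih2⟩ := ih (pre ++ [c]) child s H'
          rw [hpfx, hadd]
          refine ⟨fun q hq => ?_, ?_⟩
          · rcases q with _ | ⟨d, r⟩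
            · exact absurd rfl hq
            · by_cases hdc : d = c
              · subst hdc
                rw [show memT (pvInsert (PvTrie.mk ch) (d :: rest)).1 (d :: r)
                      = memT (pvInsert child rest).1 r by
                    rw [hins]; simp [memT, kidsFind?_replace_self ch d child _ h]]
                rcases r with _ | ⟨e, r'⟩
                · simp only [memT]
                  constructor
                  · intro _
                    exact (mem_addAll _ _ _ _).2 (Or.inl hmem)
                  · intro _; trivial
                · have := ih1 (e :: r') (by simp)
                  rw [← List.append_cons] at this
                  exact this
              · rw [show memT (pvInsert (PvTrie.mk ch) (c :: rest)).1 (d :: r)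
                      = memT (PvTrie.mk ch) (d :: r) by
                    rw [hins]; simp [memT, kidsFind?_replace_ne ch c d _ hdc]]
                rw [H (d :: r) (by simp), mem_addAll]
                constructor
                · exact Or.inl
                · rintro (hs | ⟨p, hp, heq⟩)
                  · exact hs
                  · exfalso
                    have := ofList_inj heq
                    rw [← List.append_cons] at this
                    have := List.append_cancel_left this
                    injection this with h4 _
                    exact hdc h4
          · rw [ih2, hins]
      | none =>
          have hins : pvInsert (PvTrie.mk ch) (c :: rest)
              = (PvTrie.mk (kidsSnoc ch c (pvInsert (PvTrie.mk PvKids.nil) rest).1),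
                 (pvInsert (PvTrie.mk PvKids.nil) rest).2 + 1) := by
            simp [pvInsert, h]
          have hc1 : memT (PvTrie.mk ch) [c] = false := by simp [memT, h]
          have hnot : String.ofList (pre ++ [c]) ∉ s := by
            intro hx
            have := (H [c] (by simp)).2 hx
            rw [hc1] at this; exact Bool.false_ne_true this
          have hadd : PySem.Set.add s (String.ofList (pre ++ [c])) = s ++ [String.ofList (pre ++ [c])] :=
            PySem.Set.add_of_not_mem hnot
          have H' : ∀ q, q ≠ ([] : List Char) →
              (memT (PvTrie.mk PvKids.nil) q = true ↔
                String.ofList ((pre ++ [c]) ++ q) ∈ PySem.Set.add s (String.ofList (pre ++ [c]))) := by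
            intro q hq
            rcases q with _ | ⟨a, b⟩
            · exact absurd rfl hq
            · simp only [memT, kidsFind?]
              rw [PySem.Set.mem_add]
              constructor
              · intro hfalse; exact absurd hfalse (by simp)
              · rintro (hs | heq)
                · exfalso
                  have := (H (c :: a :: b) (by simp)).2 (by rwa [← List.append_cons] at hs)
                  simp [memT, h] at this
                · exfalso
                  have := ofList_inj heq
                  have : ((a :: b) : List Char) = [] := by
                    have h2 : (pre ++ [c]) ++ (a :: b) = (pre ++ [c]) ++ [] := by simpa using this
                    exact List.append_cancel_left h2
                  simp at this
          obtain ⟨ih1, ih2⟩ := ih (pre ++ [c]) (PvTrie.mk PvKids.nil)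
            (PySem.Set.add s (String.ofList (pre ++ [c]))) H'
          rw [hpfx]
          refine ⟨fun q hq => ?_, ?_⟩
          · rcases q with _ | ⟨d, r⟩
            · exact absurd rfl hq
            · by_cases hdc : d = c
              · subst hdc
                rw [show memT (pvInsert (PvTrie.mk ch) (d :: rest)).1 (d :: r)
                      = memT (pvInsert (PvTrie.mk PvKids.nil) rest).1 r by
                    rw [hins]; simp [memT, kidsFind?_snoc_self ch d _ h]]
                rcases r with _ | ⟨e, r'⟩
                · simp only [memT]
                  constructor
                  · intro _
                    exact (mem_addAll _ _ _ _).2 (Or.inl ((PySem.Set.mem_add _ _ _).2 (Or.inr rfl)))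
                  · intro _; trivial
                · have := ih1 (e :: r') (by simp)
                  rw [← List.append_cons] at this
                  exact this
              · rw [show memT (pvInsert (PvTrie.mk ch) (c :: rest)).1 (d :: r)
                      = memT (PvTrie.mk ch) (d :: r) by
                    rw [hins]; simp [memT, kidsFind?_snoc_ne ch c d _ hdc]]
                rw [H (d :: r) (by simp), mem_addAll]
                constructor
                · intro hs
                  exact Or.inl ((PySem.Set.mem_add _ _ _).2 (Or.inl hs))
                · rintro (hs | ⟨p, hp, heq⟩)
                  · rcases (PySem.Set.mem_add _ _ _).1 hs with h1 | h1
                    · exact h1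
                    · exfalso
                      have := ofList_inj h1
                      have h2 : (d :: r : List Char) = [c] := by
                        have h3 : pre ++ (d :: r) = pre ++ [c] := by simpa using this
                        exact List.append_cancel_left h3
                      exact hdc (List.cons_eq_cons.mp h2).1
                  · exfalso
                    have := ofList_inj heq
                    rw [← List.append_cons] at this
                    have := List.append_cancel_left this
                    exact hdc (List.cons_eq_cons.mp this).1
          · rw [ih2, hins, hadd]
            simp only [List.length_append, List.length_cons, List.length_nil]
            push_cast
            ring

theorem rangeCast (n : Nat) :
    PySem.List.pyRange 0 (n : Int) 1 = List.map (fun k : Nat => (k : Int)) (List.range n) := by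
  induction n with
  | zero => simp [PySem.List.pyRange_one_eq_nil]
  | succ n ih =>
      have h1 : ((n + 1 : Nat) : Int) = (n : Int) + 1 := by push_cast; ring
      rw [h1, PySem.List.pyRange_one_succ_right (Int.natCast_nonneg n), ih, List.range_succ]
      simp

theorem slice_prefix (w : String) (k : Nat) :
    PySem.Str.slice w none (some ((k : Int) + 1)) = String.ofList (w.toList.take (k + 1)) := by
  have hcast : ((k : Int) + 1) = ((k + 1 : Nat) : Int) := by push_cast; ring
  have h : (PySem.Str.slice w none (some ((k : Int) + 1))).toList = w.toList.take (k + 1) := by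
    rw [PySem.Str.toList_slice, PySem.Chars.slice_eq_listSlice, hcast,
      PySem.List.slice_to_natCast]
  have h2 := congrArg String.ofList h
  simpa using h2

theorem pfx_eq (cs : List Char) :
    pfx cs = (List.range cs.length).map (fun k => cs.take (k + 1)) := by
  induction cs with
  | nil => simp [pfx]
  | cons c r ih =>
      show [c] :: (pfx r).map (c :: ·)
          = (List.range (r.length + 1)).map (fun k => (c :: r).take (k + 1))
      rw [List.range_succ_eq_map, ih]
      simp [List.map_map, Function.comp, List.take_succ_cons]

theorem innerB_eq (w : String) (s : PySem.Set String) :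
    (PySem.List.pyRange 0 (PySem.Str.len w) 1).foldl
        (fun s i => PySem.Set.add s (PySem.Str.slice w none (some (i + 1)))) s
      = addAll s (pfx w.toList) [] := by
  have hlen : PySem.Str.len w = (w.toList.length : Int) := by simp
  have key : ∀ (l : List Nat) (s : PySem.Set String),
      (List.map (fun k : Nat => (k : Int)) l).foldl
          (fun s i => PySem.Set.add s (PySem.Str.slice w none (some (i + 1)))) s
        = (List.map (fun k : Nat => w.toList.take (k + 1)) l).foldl
            (fun s p => PySem.Set.add s (String.ofList (([] : List Char) ++ p))) s := by
    intro l
    induction l with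
    | nil => intro s; rfl
    | cons a l ih =>
        intro s
        rw [List.map_cons, List.map_cons, List.foldl_cons, List.foldl_cons, slice_prefix]
        simp only [List.nil_append]
        exact ih _
  rw [hlen, rangeCast, key]
  rw [addAll, pfx_eq]

theorem outer : ∀ (ws : List String) (t : PvTrie) (s : PySem.Set String) (c : Int),
    (∀ q, q ≠ ([] : List Char) → (memT t q = true ↔ String.ofList q ∈ s)) →
    c = 1 + (s.length : Int) →
    (ws.foldl (fun st w =>
        let r := pvInsert st.1 w.toList
        (r.1, st.2 + r.2)) (t, c)).2
      = 1 + (((ws.foldl (fun s w =>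
          (PySem.List.pyRange 0 (PySem.Str.len w) 1).foldl
            (fun s i => PySem.Set.add s (PySem.Str.slice w none (some (i + 1)))) s) s)).length : Int) := by
  intro ws
  induction ws with
  | nil => intro t s c _ hc; simpa using hc
  | cons w ws ih =>
      intro t s c H hc
      simp only [List.foldl_cons]
      rw [innerB_eq w s]
      have H0 : ∀ q, q ≠ ([] : List Char) →
          (memT t q = true ↔ String.ofList (([] : List Char) ++ q) ∈ s) := by
        intro q hq; simpa using H q hq
      obtain ⟨h1, h2⟩ := core w.toList [] t s H0
      exact ih (pvInsert t w.toList).1 (addAll s (pfx w.toList) []) (c + (pvInsert t w.toList).2)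
        (fun q hq => by simpa using h1 q hq)
        (by rw [h2, hc]; ring)

-- ===== VERDICT (by name: the statement is the Claim_ definition above) =====
theorem trie_node_count_spec : Claim_equal_trie_node_count := by
  intro words _
  unfold Spec_trie_node_count trie_node_count trie_node_count_alt
  have H0 : ∀ q, q ≠ ([] : List Char) →
      (memT (PvTrie.mk PvKids.nil) q = true ↔ String.ofList q ∈ (PySem.Set.empty : PySem.Set String)) := by
    intro q hq
    rcases q with _ | ⟨a, b⟩
    · exact absurd rfl hq
    · simp [memT, kidsFind?, PySem.Set.empty]
  rw [outer words (PvTrie.mk PvKids.nil) PySem.Set.empty 1 H0 (by simp [PySem.Set.empty])]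
  simp [PySem.Set.len, PySem.Set.empty, PySem.List.len_eq]
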